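-- pv_equiv track=rewrite | github.com/huahanqi/COMP-431-Internet-Protocol-Project | Server.py | truncate_domain_name
-- ===== SOURCE A (Python) =====
-- def truncate_domain_name(string):
--     output = ""
--     for i in range(len(string)):
--         if(string[i] == "@"):
--             for j in range(i+1,len(string)):
--                 if(string[j] != ">"):
--                     output += string[j]
--                 else:
--                     break
--     return(output)
-- ===== SOURCE B (Python) =====
-- def truncate_domain_name(string):
--     # Single right-to-left pass: maintain the segment from the current position
--     # to the next '>' and record it whenever an '@' is seen; join back-to-front.
--     parts = []
--     tail = ""
--     for i in range(len(string) - 1, -1, -1):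
--         ch = string[i]
--         if ch == "@":
--             parts.append(tail)
--         if ch == ">":
--             tail = ""
--         else:
--             tail = ch + tail
--     return "".join(reversed(parts))
-- ===== Notes on version B (the rewrite author's own statement) =====
-- stated objective: alternative
-- what changed: Replaces the forward index loop that rescans the suffix after every '@' by a single right-to-left pass that maintains the current segment up to the next '>' and records it at each '@', joining the recorded parts back-to-front.
import Mathlib
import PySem

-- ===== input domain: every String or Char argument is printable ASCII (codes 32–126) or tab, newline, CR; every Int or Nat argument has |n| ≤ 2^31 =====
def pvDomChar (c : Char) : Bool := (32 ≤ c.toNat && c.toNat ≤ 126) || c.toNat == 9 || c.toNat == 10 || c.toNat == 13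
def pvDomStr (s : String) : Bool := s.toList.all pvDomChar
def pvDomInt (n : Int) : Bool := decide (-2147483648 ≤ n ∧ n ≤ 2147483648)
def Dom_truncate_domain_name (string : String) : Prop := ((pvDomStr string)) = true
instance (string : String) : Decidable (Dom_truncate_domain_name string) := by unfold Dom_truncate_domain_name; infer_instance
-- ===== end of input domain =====

-- B replaces A's forward loop with a nested rescan per '@' by one right-to-left pass
-- maintaining the segment up to the next '>' (alternative decomposition, not faster).


-- ===== PORT A =====
-- inner loop: 'for j in range(i+1, len): if s[j] != ">": output += s[j] else: break'
-- scanning the suffix after the '@'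
def pvInnerA : List Char → String → String
  | [], out => out
  | c :: rest, out => if c ≠ '>' then pvInnerA rest (out.push c) else out

-- outer loop: 'for i in range(len(string)): if string[i] == "@": <inner over suffix>'
def pvOuterA : List Char → String → String
  | [], out => out
  | c :: rest, out => pvOuterA rest (if c = '@' then pvInnerA rest out else out)

def truncate_domain_name (string : String) : String :=
  pvOuterA string.toList ""

-- ===== PORT B =====
-- right-to-left pass, realised as structural recursion from the right end:
-- returns (parts collected so far, current segment up to the next '>')
def pvPassB : List Char → (List (List Char) × List Char)
  | [] => ([], [])
  | c :: rest =>
    let (parts, tail) := pvPassB rest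
    (if c = '@' then tail :: parts else parts,
     if c = '>' then [] else c :: tail)

def truncate_domain_name_alt (string : String) : String :=
  String.ofList (pvPassB string.toList).1.flatten   -- ''.join(reversed(parts))

-- ===== PRECONDITION & SPEC =====
def Spec_truncate_domain_name (string : String) (out : String) : Prop := out = truncate_domain_name_alt string
instance (string : String) (out : String) : Decidable (Spec_truncate_domain_name string out) := by unfold Spec_truncate_domain_name; infer_instance

-- ===== CLAIM (what is proved, stated in full; the proofs are below) =====
def Claim_equal_truncate_domain_name : Prop := ∀ (string : String), Dom_truncate_domain_name string → Spec_truncate_domain_name string (truncate_domain_name string)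

-- ===== LEMMAS AND PROOFS =====

theorem pvInnerA_eq (l : List Char) (out : String) :
    (pvInnerA l out).toList = out.toList ++ l.takeWhile (· ≠ '>') := by
  induction l generalizing out with
  | nil => simp [pvInnerA]
  | cons c rest ih =>
    by_cases h : c = '>'
    · simp [pvInnerA, h, List.takeWhile]
    · simp [pvInnerA, h, List.takeWhile, ih]

theorem pvPassB_snd (l : List Char) :
    (pvPassB l).2 = l.takeWhile (· ≠ '>') := by
  induction l with
  | nil => simp [pvPassB]
  | cons c rest ih =>
    by_cases h : c = '>'
    · simp [pvPassB, h, List.takeWhile]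
    · simp [pvPassB, h, List.takeWhile, ih]

theorem pvOuterA_eq (l : List Char) (out : String) :
    (pvOuterA l out).toList = out.toList ++ (pvPassB l).1.flatten := by
  induction l generalizing out with
  | nil => simp [pvOuterA, pvPassB]
  | cons c rest ih =>
    by_cases h : c = '@'
    · simp [pvOuterA, pvPassB, h, ih, pvInnerA_eq, pvPassB_snd]
    · simp [pvOuterA, pvPassB, h, ih]

-- ===== VERDICT (by name: the statement is the Claim_ definition above) =====
theorem truncate_domain_name_spec : Claim_equal_truncate_domain_name := by
  intro s _
  unfold Spec_truncate_domain_name truncate_domain_name truncate_domain_name_alt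
  apply String.toList_inj.mp
  simpa using pvOuterA_eq s.toList ""
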